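-- pv_equiv track=rewrite | github.com/emremutlu16/string_smilarity | string_smilarity.py | similarity_score_calculator
-- ===== SOURCE A (Python) =====
-- def similarity_score_calculator(prefix_list, suffix_list):
--     similarity_score = 0
--     for suffix in suffix_list:
--         if suffix[0] != prefix_list[0][0]:
--             continue
--         elif suffix in prefix_list:
--             similarity_score += len(suffix)
--         else:
--             check_word = suffix[:-1]
--             for w in range(len(check_word)):
--                 if check_word in prefix_list:
--                     similarity_score += len(check_word)
--                     break
--                 elif check_word:
--                     # check_word = suffix[:-1] yaptıktan sonra check_word
--                     # boş gelmesi ihtimaline karşı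
--                     check_word = check_word[:-1]
--                     # suffix in sonundan bir harf çıkartıp kontrol edildiğinde
--                     # prefix listesinde çıkmıyorsa harf bitene kadar suffix
--                     # sonundan harf çıkartıp kontrole devam etmek için
--     return similarity_score
-- ===== SOURCE B (Python) =====
-- def similarity_score_calculator(prefix_list, suffix_list):
--     # Hash the prefixes once; per suffix, try only the distinct prefix lengths
--     # in decreasing order and stop at the first (= longest) hit.
--     prefixes = set(prefix_list)
--     lengths = sorted({len(p) for p in prefix_list}, reverse=True)
--     similarity_score = 0
--     for suffix in suffix_list:
--         if suffix[0] != prefix_list[0][0]: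
--             continue
--         for length in lengths:
--             if length <= len(suffix) and suffix[:length] in prefixes:
--                 similarity_score += length
--                 break
--     return similarity_score
-- ===== Notes on version B (the rewrite author's own statement) =====
-- stated objective: faster
-- what changed: A repeatedly shortens each suffix and runs a list-membership scan of prefix_list for every candidate length; B builds a hash set of the prefixes and their distinct lengths once, then answers each suffix with at most one hashed lookup per distinct prefix length, longest first.
import Mathlib
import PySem

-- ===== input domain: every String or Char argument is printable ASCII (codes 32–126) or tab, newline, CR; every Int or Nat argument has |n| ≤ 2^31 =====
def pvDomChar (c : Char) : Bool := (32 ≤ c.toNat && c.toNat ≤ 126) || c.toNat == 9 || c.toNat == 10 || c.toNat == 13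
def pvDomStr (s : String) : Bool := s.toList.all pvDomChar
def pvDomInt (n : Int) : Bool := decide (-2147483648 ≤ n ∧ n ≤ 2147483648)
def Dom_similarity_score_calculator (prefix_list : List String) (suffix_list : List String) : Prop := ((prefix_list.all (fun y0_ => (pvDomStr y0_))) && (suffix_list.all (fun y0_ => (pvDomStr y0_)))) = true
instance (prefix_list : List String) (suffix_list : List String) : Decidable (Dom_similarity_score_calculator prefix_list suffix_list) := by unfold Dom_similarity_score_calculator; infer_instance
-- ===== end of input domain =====

-- B hashes the prefixes into a set once and, per suffix, probes only the distinct
-- prefix lengths in decreasing order, stopping at the first hit (objective: faster).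

-- ===== PORT A =====
-- inner 'for w in range(len(check_word))' loop of A: returns the score contribution (break = return)
def pvA_inner (prefix_list : List String) : Nat → String → Int
  | 0, _ => 0
  | n+1, cw =>
      if prefix_list.contains cw then PySem.Str.len cw
      else if cw ≠ "" then pvA_inner prefix_list n (PySem.Str.slice cw none (some (-1)))
      else pvA_inner prefix_list n cw

def similarity_score_calculator (prefix_list : List String) (suffix_list : List String) : Int :=
  suffix_list.foldl (fun similarity_score suffix =>
    if PySem.Str.pyGet? suffix 0 ≠ PySem.Str.pyGet? (PySem.List.pyGetD prefix_list 0 "") 0 then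
      similarity_score
    else if prefix_list.contains suffix then
      similarity_score + PySem.Str.len suffix
    else
      let check_word := PySem.Str.slice suffix none (some (-1))
      similarity_score + pvA_inner prefix_list (PySem.Str.len check_word).toNat check_word) 0

-- ===== PORT B =====
-- inner 'for length in lengths' loop of B: returns the score contribution (break = return)
def pvB_first (prefixes : List String) (s : String) : List Int → Int
  | [] => 0
  | length :: rest =>
      if (decide (length ≤ PySem.Str.len s) && prefixes.contains (PySem.Str.slice s none (some length))) then
        length
      else pvB_first prefixes s rest

def similarity_score_calculator_alt (prefix_list : List String) (suffix_list : List String) : Int :=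
  let prefixes := PySem.Set.ofList prefix_list
  let lengths := PySem.List.sorted (PySem.Set.ofList (prefix_list.map PySem.Str.len)) (fun x => x) true
  suffix_list.foldl (fun similarity_score suffix =>
    if PySem.Str.pyGet? suffix 0 ≠ PySem.Str.pyGet? (PySem.List.pyGetD prefix_list 0 "") 0 then
      similarity_score
    else
      similarity_score + pvB_first prefixes suffix lengths) 0

-- ===== PRECONDITION & SPEC =====
-- Pre_ excludes exactly the inputs where A raises IndexError: a nonempty suffix_list
-- together with an empty prefix_list, an empty prefix_list[0], or an empty suffix.
def Pre_similarity_score_calculator (prefix_list : List String) (suffix_list : List String) : Prop :=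
  suffix_list = [] ∨
    (prefix_list ≠ [] ∧ prefix_list.headD "" ≠ "" ∧ ∀ s ∈ suffix_list, s ≠ "")
instance (prefix_list : List String) (suffix_list : List String) : Decidable (Pre_similarity_score_calculator prefix_list suffix_list) := by unfold Pre_similarity_score_calculator; infer_instance

def pvWitness_similarity_score_calculator : List String × List String := (["ab", "a"], ["abc", "b"])

def Spec_similarity_score_calculator (prefix_list : List String) (suffix_list : List String) (out : Int) : Prop := out = similarity_score_calculator_alt prefix_list suffix_list
instance (prefix_list : List String) (suffix_list : List String) (out : Int) : Decidable (Spec_similarity_score_calculator prefix_list suffix_list out) := by unfold Spec_similarity_score_calculator; infer_instance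

-- ===== CLAIM (what is proved, stated in full; the proofs are below) =====
def Claim_equal_similarity_score_calculator : Prop := ∀ (prefix_list : List String) (suffix_list : List String), Dom_similarity_score_calculator prefix_list suffix_list → Pre_similarity_score_calculator prefix_list suffix_list → Spec_similarity_score_calculator prefix_list suffix_list (similarity_score_calculator prefix_list suffix_list)

-- ===== LEMMAS AND PROOFS =====

-- the value B's inner fold computes for one suffix
def pvBig (prefix_list : List String) (s : String) : Int :=
  (prefix_list.map (fun p =>
    if PySem.Str.startswith s p = true then PySem.Str.len p else 0)).foldr max 0

theorem pvStartswith_iff (s p : String) :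
    PySem.Str.startswith s p = true ↔ p.toList <+: s.toList := by
  rw [PySem.Str.startswith_eq]; exact PySem.Chars.startswith_iff _ _

theorem pvStr_eq_iff (s t : String) : s = t ↔ s.toList = t.toList := by
  constructor
  · intro h; rw [h]
  · intro h; exact String.ext h

theorem pvStr_len_toList (s : String) : PySem.Str.len s = (s.toList.length : Int) := by
  simp [PySem.Str.len_eq, String.length_toList]

theorem pvBig_nonneg (pl : List String) (s : String) : 0 ≤ pvBig pl s := by
  induction pl with
  | nil => simp [pvBig]
  | cons p pl ih =>
      simp only [pvBig, List.map_cons, List.foldr_cons] at *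
      exact le_max_of_le_right ih

theorem pvBig_cons (p : String) (pl : List String) (s : String) :
    pvBig (p :: pl) s
      = max (if PySem.Str.startswith s p = true then PySem.Str.len p else 0) (pvBig pl s) := by
  simp [pvBig]

-- pvBig of a string in the list is its own length
theorem pvBig_of_mem (pl : List String) (s : String) (hmem : s ∈ pl) :
    pvBig pl s = PySem.Str.len s := by
  have hub : ∀ pl' : List String, pvBig pl' s ≤ PySem.Str.len s := by
    intro pl'
    induction pl' with
    | nil => simp [pvBig]
    | cons p pl' ih =>
        simp only [pvBig, List.map_cons, List.foldr_cons] at *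
        have hv : (if PySem.Str.startswith s p = true then PySem.Str.len p else 0)
            ≤ PySem.Str.len s := by
          by_cases hsw : PySem.Str.startswith s p = true
          · rw [if_pos hsw, pvStr_len_toList, pvStr_len_toList]
            exact_mod_cast ((pvStartswith_iff s p).mp hsw).length_le
          · rw [if_neg hsw, pvStr_len_toList]
            positivity
        exact max_le hv ih
  have hlb : PySem.Str.len s ≤ pvBig pl s := by
    induction pl with
    | nil => cases hmem
    | cons p pl ih =>
        simp only [pvBig, List.map_cons, List.foldr_cons]
        rcases List.mem_cons.mp hmem with h | h
        · subst h
          have hsw : PySem.Str.startswith s s = true :=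
            (pvStartswith_iff s s).mpr (List.prefix_refl _)
          rw [if_pos hsw]
          exact le_max_left _ _
        · exact le_max_of_le_right (ih h)
  exact le_antisymm (hub pl) hlb

theorem pvBig_empty (pl : List String) : pvBig pl "" = 0 := by
  induction pl with
  | nil => simp [pvBig]
  | cons p pl ih =>
      simp only [pvBig, List.map_cons, List.foldr_cons] at *
      rw [ih]
      have hv : (if PySem.Str.startswith "" p = true then PySem.Str.len p else 0) = 0 := by
        by_cases hsw : PySem.Str.startswith "" p = true
        · have hp : p.toList = [] := by
            have h := (pvStartswith_iff "" p).mp hsw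
            simpa using h
          rw [if_pos hsw, pvStr_len_toList, hp]
          simp
        · rw [if_neg hsw]
      rw [hv]
      simp

-- dropping the last character does not change pvBig when s itself is not in the list
theorem pvBig_dropLast (pl : List String) (s : String) (hne : s ∉ pl) :
    pvBig pl s = pvBig pl (PySem.Str.slice s none (some (-1))) := by
  unfold pvBig
  congr 1
  apply List.map_congr_left
  intro p hp
  have hps : p ≠ s := by rintro rfl; exact hne hp
  have hiff : (p.toList <+: s.toList) ↔ (p.toList <+: s.toList.dropLast) := by
    constructor
    · intro h
      have hlen : p.toList.length < s.toList.length := by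
        rcases lt_or_eq_of_le h.length_le with hlt | heq
        · exact hlt
        · exact absurd ((pvStr_eq_iff p s).mpr (List.IsPrefix.eq_of_length h heq)) hps
      rw [List.dropLast_eq_take]
      exact (List.prefix_take_iff).mpr ⟨h, by omega⟩
    · intro h
      exact h.trans (List.dropLast_prefix _)
  by_cases hsw : PySem.Str.startswith s p = true
  · have hsw2 : PySem.Str.startswith (PySem.Str.slice s none (some (-1))) p = true := by
      rw [pvStartswith_iff, PySem.Str.slice_to_neg_one]
      exact hiff.mp ((pvStartswith_iff s p).mp hsw)
    rw [if_pos hsw, if_pos hsw2]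
  · have hsw2 : ¬ PySem.Str.startswith (PySem.Str.slice s none (some (-1))) p = true := by
      intro hc
      apply hsw
      rw [pvStartswith_iff]
      apply hiff.mpr
      have := (pvStartswith_iff _ p).mp hc
      rwa [PySem.Str.slice_to_neg_one] at this
    rw [if_neg hsw, if_neg hsw2]

-- A's inner loop, run with fuel = len check_word, computes pvBig
theorem pvA_inner_eq (pl : List String) (n : Nat) (cw : String) (h : n = cw.toList.length) :
    pvA_inner pl n cw = pvBig pl cw := by
  induction n generalizing cw with
  | zero =>
      have hnil : cw.toList = [] := List.eq_nil_of_length_eq_zero h.symm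
      have hcw : cw = "" := (pvStr_eq_iff cw "").mpr (by simpa using hnil)
      rw [hcw]
      show (0 : Int) = pvBig pl ""
      exact (pvBig_empty pl).symm
  | succ n ih =>
      rw [pvA_inner]
      by_cases hmem : pl.contains cw = true
      · rw [if_pos hmem]
        exact (pvBig_of_mem pl cw (List.mem_of_elem_eq_true hmem)).symm
      · rw [if_neg hmem]
        have hcwne : cw ≠ "" := by
          intro hcw
          rw [hcw] at h
          simp at h
        rw [if_pos hcwne]
        have hmem' : cw ∉ pl := fun hc => hmem (List.elem_eq_true_of_mem hc)
        rw [ih _ (by rw [PySem.Str.slice_to_neg_one, List.length_dropLast]; omega)]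
        exact (pvBig_dropLast pl cw hmem').symm

-- pvBig dominates the length of every matching entry
theorem pvBig_ge (pl : List String) (s : String) (p : String) (hp : p ∈ pl)
    (hsw : PySem.Str.startswith s p = true) : PySem.Str.len p ≤ pvBig pl s := by
  induction pl with
  | nil => cases hp
  | cons q pl ih =>
      rw [pvBig_cons]
      rcases List.mem_cons.mp hp with h | h
      · subst h
        rw [if_pos hsw]
        exact le_max_left _ _
      · exact le_max_of_le_right (ih h)

theorem pvBig_le (pl : List String) (s : String) (C : Int) (hC : 0 ≤ C)
    (h : ∀ p ∈ pl, PySem.Str.startswith s p = true → PySem.Str.len p ≤ C) :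
    pvBig pl s ≤ C := by
  induction pl with
  | nil => simpa [pvBig] using hC
  | cons q pl ih =>
      rw [pvBig_cons]
      have hq : (if PySem.Str.startswith s q = true then PySem.Str.len q else 0) ≤ C := by
        by_cases hsw : PySem.Str.startswith s q = true
        · rw [if_pos hsw]; exact h q (List.mem_cons_self) hsw
        · rw [if_neg hsw]; exact hC
      exact max_le hq (ih (fun p hp hsw => h p (List.mem_cons_of_mem _ hp) hsw))

-- the loop condition of B holds for a length L iff some entry of length L is a prefix of s
theorem pvPred_iff (pl : List String) (s : String) (L : Int) (hL : 0 ≤ L) :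
    (L ≤ PySem.Str.len s ∧ PySem.Str.slice s none (some L) ∈ pl)
      ↔ ∃ p ∈ pl, PySem.Str.startswith s p = true ∧ PySem.Str.len p = L := by
  constructor
  · rintro ⟨hle, hmem⟩
    refine ⟨PySem.Str.slice s none (some L), hmem, ?_, ?_⟩
    · rw [pvStartswith_iff]
      have ht : (PySem.Str.slice s none (some L)).toList = s.toList.take L.toNat := by
        simp [PySem.List.slice_to _ hL]
      rw [ht]
      exact List.take_prefix _ _
    · rw [pvStr_len_toList]
      have ht : (PySem.Str.slice s none (some L)).toList = s.toList.take L.toNat := by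
        simp [PySem.List.slice_to _ hL]
      rw [ht, List.length_take]
      rw [pvStr_len_toList] at hle
      omega
  · rintro ⟨p, hp, hsw, hlen⟩
    have hpre := (pvStartswith_iff s p).mp hsw
    have hlen' : p.toList.length = L.toNat := by
      rw [pvStr_len_toList] at hlen; omega
    constructor
    · rw [pvStr_len_toList]
      have := hpre.length_le
      omega
    · have heq : PySem.Str.slice s none (some L) = p := by
        apply (pvStr_eq_iff _ _).mpr
        have ht : (PySem.Str.slice s none (some L)).toList = s.toList.take L.toNat := by
          simp [PySem.List.slice_to _ hL]
        rw [ht, ← hlen']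
        exact (List.prefix_iff_eq_take.mp hpre).symm
      rw [heq]; exact hp

-- B's first-hit loop over strictly decreasing candidate lengths computes pvBig
theorem pvFirst_eq (pl : List String) (prefixes : List String)
    (hmem : ∀ x : String, x ∈ prefixes ↔ x ∈ pl) (s : String) :
    ∀ lens : List Int, lens.Pairwise (· > ·) → (∀ L ∈ lens, 0 ≤ L) →
      (∀ p ∈ pl, PySem.Str.startswith s p = true → PySem.Str.len p ∈ lens) →
      pvB_first prefixes s lens = pvBig pl s := by
  intro lens
  induction lens with
  | nil =>
      intro _ _ hall
      rw [pvB_first]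
      refine (le_antisymm ?_ (pvBig_nonneg pl s)).symm
      exact pvBig_le pl s 0 le_rfl (fun p hp hsw => absurd (hall p hp hsw) (List.not_mem_nil))
  | cons L t ih =>
      intro hpair hnn hall
      rw [pvB_first]
      have hL0 : 0 ≤ L := hnn L (List.mem_cons_self)
      have hhead : ∀ b ∈ t, L > b := (List.pairwise_cons.mp hpair).1
      by_cases hc : L ≤ PySem.Str.len s ∧ PySem.Str.slice s none (some L) ∈ pl
      · have hcond : (decide (L ≤ PySem.Str.len s)
            && prefixes.contains (PySem.Str.slice s none (some L))) = true := by
          rcases hc with ⟨h1, h2⟩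
          simp only [Bool.and_eq_true, decide_eq_true_eq]
          exact ⟨h1, List.elem_eq_true_of_mem ((hmem _).mpr h2)⟩
        rw [if_pos hcond]
        rcases (pvPred_iff pl s L hL0).mp hc with ⟨p, hp, hsw, hlen⟩
        refine le_antisymm ?_ ?_
        · rw [← hlen]; exact pvBig_ge pl s p hp hsw
        · apply pvBig_le pl s L hL0
          intro q hq hswq
          rcases List.mem_cons.mp (hall q hq hswq) with h | h
          · omega
          · exact le_of_lt (hhead _ h)
      · have hcond : (decide (L ≤ PySem.Str.len s)
            && prefixes.contains (PySem.Str.slice s none (some L))) = false := by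
          rw [Bool.and_eq_false_iff]
          by_cases h1 : L ≤ PySem.Str.len s
          · right
            rw [Bool.eq_false_iff]
            intro h2
            exact hc ⟨h1, (hmem _).mp (List.mem_of_elem_eq_true h2)⟩
          · left; simpa using h1
        rw [hcond]
        simp only [Bool.false_eq_true, if_false]
        apply ih (List.pairwise_cons.mp hpair).2 (fun L' hL' => hnn L' (List.mem_cons_of_mem _ hL'))
        intro p hp hsw
        rcases List.mem_cons.mp (hall p hp hsw) with h | h
        · exfalso
          apply hc
          apply (pvPred_iff pl s L hL0).mpr
          exact ⟨p, hp, hsw, h⟩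
        · exact h

-- the per-suffix contributions of the two ports agree
theorem pvStep_eq (pl : List String) (score : Int) (suffix : String) :
    (if PySem.Str.pyGet? suffix 0 ≠ PySem.Str.pyGet? (PySem.List.pyGetD pl 0 "") 0 then score
     else if pl.contains suffix then score + PySem.Str.len suffix
     else
       let check_word := PySem.Str.slice suffix none (some (-1))
       score + pvA_inner pl (PySem.Str.len check_word).toNat check_word)
    =
    (if PySem.Str.pyGet? suffix 0 ≠ PySem.Str.pyGet? (PySem.List.pyGetD pl 0 "") 0 then score
     else score + pvB_first (PySem.Set.ofList pl) suffix
        (PySem.List.sorted (PySem.Set.ofList (pl.map PySem.Str.len)) (fun x => x) true)) := by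
  by_cases hg : PySem.Str.pyGet? suffix 0 ≠ PySem.Str.pyGet? (PySem.List.pyGetD pl 0 "") 0
  · rw [if_pos hg, if_pos hg]
  · rw [if_neg hg, if_neg hg]
    have hsorted : pvB_first (PySem.Set.ofList pl) suffix
        (PySem.List.sorted (PySem.Set.ofList (pl.map PySem.Str.len)) (fun x => x) true)
        = pvBig pl suffix := by
      apply pvFirst_eq pl _ (fun x => PySem.Set.mem_ofList pl x) suffix
      · -- strictly decreasing: reverse-sorted and nodup
        have hp1 : (PySem.List.sorted (PySem.Set.ofList (pl.map PySem.Str.len)) (fun x => x) true).Pairwise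
            (fun a b => b ≤ a) := PySem.List.sorted_pairwise_rev _ _
        have hnd : (PySem.List.sorted (PySem.Set.ofList (pl.map PySem.Str.len)) (fun x => x) true).Nodup := by
          have hperm := PySem.List.sorted_perm (PySem.Set.ofList (pl.map PySem.Str.len)) (fun x : Int => x) true
          exact hperm.symm.nodup (PySem.Set.nodup_ofList _)
        exact (hp1.and hnd).imp (fun h => by omega)
      · intro L hL
        rw [PySem.List.mem_sorted, PySem.Set.mem_ofList _ _] at hL
        rcases List.mem_map.mp hL with ⟨p, _, hp⟩
        rw [← hp, pvStr_len_toList]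
        positivity
      · intro p hp _
        rw [PySem.List.mem_sorted, PySem.Set.mem_ofList _ _]
        exact List.mem_map.mpr ⟨p, hp, rfl⟩
    rw [hsorted]
    by_cases hmem : pl.contains suffix = true
    · rw [if_pos hmem, pvBig_of_mem pl suffix (List.mem_of_elem_eq_true hmem)]
    · rw [if_neg hmem]
      have hmem' : suffix ∉ pl := fun hc => hmem (List.elem_eq_true_of_mem hc)
      have hfuel : (PySem.Str.len (PySem.Str.slice suffix none (some (-1)))).toNat
          = (PySem.Str.slice suffix none (some (-1))).toList.length := by
        rw [pvStr_len_toList]; simp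
      show score + pvA_inner pl (PySem.Str.len (PySem.Str.slice suffix none (some (-1)))).toNat
          (PySem.Str.slice suffix none (some (-1))) = score + pvBig pl suffix
      rw [pvA_inner_eq pl _ _ hfuel, ← pvBig_dropLast pl suffix hmem']

-- ===== VERDICT (by name: the statement is the Claim_ definition above) =====
theorem similarity_score_calculator_spec : Claim_equal_similarity_score_calculator := by
  intro prefix_list suffix_list _ _
  unfold Spec_similarity_score_calculator similarity_score_calculator similarity_score_calculator_alt
  apply List.foldl_ext
  intro acc s _
  exact pvStep_eq prefix_list acc s
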